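-- pv_equiv track=rewrite | github.com/lowRISC/opentitan | hw/ip/rom_ctrl/util/scramble_image.py | subst_perm_enc
-- ===== SOURCE A (Python) =====
-- from typing import Dict, List
--
-- PRESENT_SBOX4 = [
--     0xc, 0x5, 0x6, 0xb,
--     0x9, 0x0, 0xa, 0xd,
--     0x3, 0xe, 0xf, 0x8,
--     0x4, 0x7, 0x1, 0x2
-- ]
--
-- def sbox(data: int, width: int, coeffs: List[int]) -> int:
--     assert 0 <= width
--     assert 0 <= data < (1 << width)
--
--     full_mask = (1 << width) - 1
--     sbox_mask = (1 << (4 * (width // 4))) - 1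
--
--     ret = data & (full_mask & ~sbox_mask)
--     for i in range(width // 4):
--         nibble = (data >> (4 * i)) & 0xf
--         sb_nibble = coeffs[nibble]
--         ret |= sb_nibble << (4 * i)
--
--     return ret
--
-- def subst_perm_enc(data: int, key: int, width: int, num_rounds: int) -> int:
--     '''A model of prim_subst_perm in encrypt mode'''
--     assert 0 <= width
--     assert 0 <= data < (1 << width)
--     assert 0 <= key < (1 << width)
--
--     full_mask = (1 << width) - 1
--     bfly_mask = (1 << (2 * (width // 2))) - 1
--
--     for rnd in range(num_rounds):
--         data_xor = data ^ key
--
--         # SBox layer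
--         data_sbox = sbox(data_xor, width, PRESENT_SBOX4)
--
--         # Reverse the vector
--         data_rev = 0
--         for i in range(width):
--             bit = (data_sbox >> i) & 1
--             data_rev |= bit << (width - 1 - i)
--
--         # Butterfly
--         data_bfly = data_rev & (full_mask & ~bfly_mask)
--         for i in range(width // 2):
--             # data_bfly[i] = data_rev[2i]
--             bit = (data_rev >> (2 * i)) & 1
--             data_bfly |= bit << i
--             # data_bfly[width/2 + i] = data_rev[2i+1]
--             bit = (data_rev >> (2 * i + 1)) & 1
--             data_bfly |= bit << (width // 2 + i)
--
--         data = data_bfly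
--
--     return data ^ key
-- ===== SOURCE B (Python) =====
-- PRESENT_SBOX4 = [
--     0xc, 0x5, 0x6, 0xb,
--     0x9, 0x0, 0xa, 0xd,
--     0x3, 0xe, 0xf, 0x8,
--     0x4, 0x7, 0x1, 0x2
-- ]
--
-- def subst_perm_enc(data: int, key: int, width: int, num_rounds: int) -> int:
--     '''A model of prim_subst_perm in encrypt mode'''
--     assert 0 <= width
--     assert 0 <= data < (1 << width)
--     assert 0 <= key < (1 << width)
--
--     half = width // 2
--     sbw = 4 * (width // 4)
--
--     # perm[i] = final destination of bit i after the reverse + butterfly layers: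
--     # reversal sends i to width-1-i; the butterfly sends even j to j//2, odd j
--     # to half + j//2 (bits at j >= 2*half pass through). Built once, not per round.
--     def bfly(j: int) -> int:
--         if j < 2 * half:
--             return j // 2 if j % 2 == 0 else half + j // 2
--         return j
--
--     perm = [bfly(width - 1 - i) for i in range(width)]
--
--     for _ in range(num_rounds):
--         x = data ^ key
--
--         # SBox layer: high bits not covered by a nibble pass through
--         y = (x >> sbw) << sbw
--         for i in range(width // 4):
--             y |= PRESENT_SBOX4[(x >> (4 * i)) & 0xf] << (4 * i)
--
--         # place every bit at its final destination in a single pass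
--         data = 0
--         for i in range(width):
--             data |= ((y >> i) & 1) << perm[i]
--
--     return data ^ key
-- ===== Notes on version B (the rewrite author's own statement) =====
-- stated objective: simpler
-- what changed: Instead of rebuilding the bit-reversal and butterfly layers with two separate index loops in every round, B composes them once into a precomputed destination table perm before the round loop and each round places every bit at perm[i] in a single pass (the sbox pass-through of uncovered high bits becomes a plain shift pair).
import Mathlib
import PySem

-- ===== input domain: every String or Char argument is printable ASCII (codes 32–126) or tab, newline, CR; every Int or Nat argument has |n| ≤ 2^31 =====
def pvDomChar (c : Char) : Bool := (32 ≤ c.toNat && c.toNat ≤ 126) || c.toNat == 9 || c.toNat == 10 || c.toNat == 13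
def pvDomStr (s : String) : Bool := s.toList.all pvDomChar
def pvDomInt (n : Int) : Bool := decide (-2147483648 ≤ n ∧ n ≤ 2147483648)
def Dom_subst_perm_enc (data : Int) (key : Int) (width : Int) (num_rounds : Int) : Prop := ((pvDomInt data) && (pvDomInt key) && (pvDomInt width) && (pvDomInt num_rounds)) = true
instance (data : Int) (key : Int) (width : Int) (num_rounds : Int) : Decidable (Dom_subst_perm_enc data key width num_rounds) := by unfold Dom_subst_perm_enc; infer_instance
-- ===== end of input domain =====

-- B replaces A's per-round reverse pass + butterfly pass by ONE bit-placement pass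
-- through a permutation table built once before the round loop (objective: simpler).

-- ===== PORT A =====
def PRESENT_SBOX4 : List Int := [12, 5, 6, 11, 9, 0, 10, 13, 3, 14, 15, 8, 4, 7, 1, 2]

-- port of A's helper `sbox`; `coeffs[nibble]` is ported with pyGetD (the index is
-- masked to 0..15 and the table has 16 entries, so Python never raises; the default
-- is never used)
def sbox (data : Int) (width : Int) (coeffs : List Int) : Int :=
  let w := width.toNat
  let full_mask : Int := (1 <<< w) - 1
  let sbox_mask : Int := (1 <<< (4 * (w / 4))) - 1
  let ret := PySem.Int.band data (PySem.Int.band full_mask (Int.not sbox_mask))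
  (List.range (w / 4)).foldl (fun ret (i : Nat) =>
    let nibble := PySem.Int.band (data >>> (4 * i)) 0xf
    let sb_nibble := PySem.List.pyGetD coeffs nibble 0
    PySem.Int.bor ret (sb_nibble <<< (4 * i))) ret

def subst_perm_enc (data : Int) (key : Int) (width : Int) (num_rounds : Int) : Int :=
  let w := width.toNat
  let full_mask : Int := (1 <<< w) - 1
  let bfly_mask : Int := (1 <<< (2 * (w / 2))) - 1
  let final := (List.range num_rounds.toNat).foldl (fun data _ =>
    let data_xor := PySem.Int.bxor data key
    let data_sbox := sbox data_xor width PRESENT_SBOX4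
    let data_rev := (List.range w).foldl (fun acc (i : Nat) =>
      PySem.Int.bor acc ((PySem.Int.band (data_sbox >>> i) 1) <<< (w - 1 - i))) 0
    let data_bfly := PySem.Int.band data_rev (PySem.Int.band full_mask (Int.not bfly_mask))
    (List.range (w / 2)).foldl (fun acc (i : Nat) =>
      let acc := PySem.Int.bor acc ((PySem.Int.band (data_rev >>> (2 * i)) 1) <<< i)
      PySem.Int.bor acc ((PySem.Int.band (data_rev >>> (2 * i + 1)) 1) <<< (w / 2 + i)))
      data_bfly) data
  PySem.Int.bxor final key

-- ===== PORT B =====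
def subst_perm_enc_alt (data : Int) (key : Int) (width : Int) (num_rounds : Int) : Int :=
  let w := width.toNat
  let half := w / 2
  let sbw := 4 * (w / 4)
  -- perm[i] = final destination of source bit i (reversal composed with butterfly)
  let perm : List Nat := (List.range w).map (fun i =>
    let j := w - 1 - i
    if j < 2 * half then (if j % 2 = 0 then j / 2 else half + j / 2) else j)
  let final := (List.range num_rounds.toNat).foldl (fun data _ =>
    let x := PySem.Int.bxor data key
    let y := (List.range (w / 4)).foldl (fun y (i : Nat) =>
      PySem.Int.bor y
        ((PySem.List.pyGetD PRESENT_SBOX4 (PySem.Int.band (x >>> (4 * i)) 0xf) 0) <<< (4 * i)))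
      ((x >>> sbw) <<< sbw)
    (List.range w).foldl (fun acc (i : Nat) =>
      PySem.Int.bor acc ((PySem.Int.band (y >>> i) 1) <<< (perm.getD i 0))) 0) data
  PySem.Int.bxor final key

-- ===== PRECONDITION & SPEC =====
-- exactly the inputs accepted by A's `assert` lines; elsewhere Python raises AssertionError
def Pre_subst_perm_enc (data : Int) (key : Int) (width : Int) (num_rounds : Int) : Prop :=
  0 ≤ width ∧ 0 ≤ data ∧ data < 2 ^ width.toNat ∧ 0 ≤ key ∧ key < 2 ^ width.toNat
instance (data : Int) (key : Int) (width : Int) (num_rounds : Int) : Decidable (Pre_subst_perm_enc data key width num_rounds) := by unfold Pre_subst_perm_enc; infer_instance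
def pvWitness_subst_perm_enc : Int × Int × Int × Int := (5, 3, 3, 2)

def Spec_subst_perm_enc (data : Int) (key : Int) (width : Int) (num_rounds : Int) (out : Int) : Prop := out = subst_perm_enc_alt data key width num_rounds
instance (data : Int) (key : Int) (width : Int) (num_rounds : Int) (out : Int) : Decidable (Spec_subst_perm_enc data key width num_rounds out) := by unfold Spec_subst_perm_enc; infer_instance

-- ===== CLAIM (what is proved, stated in full; the proofs are below) =====
def Claim_equal_subst_perm_enc : Prop := ∀ (data : Int) (key : Int) (width : Int) (num_rounds : Int), Dom_subst_perm_enc data key width num_rounds → Pre_subst_perm_enc data key width num_rounds → Spec_subst_perm_enc data key width num_rounds (subst_perm_enc data key width num_rounds)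

-- ===== LEMMAS AND PROOFS =====

-- Nat-level models of the loops (proof-side only)
def natTable : List Nat := [12, 5, 6, 11, 9, 0, 10, 13, 3, 14, 15, 8, 4, 7, 1, 2]

def bflyIdx (w j : Nat) : Nat :=
  if j < 2 * (w / 2) then (if j % 2 = 0 then j / 2 else w / 2 + j / 2) else j

def maskAbove (w s : Nat) : Nat := 2 ^ w - 1 - ((2 ^ w - 1) &&& (2 ^ s - 1))

def nSbox (w x init : Nat) : Nat :=
  (List.range (w / 4)).foldl
    (fun acc i => acc ||| ((natTable.getD ((x >>> (4 * i)) &&& 15) 0) <<< (4 * i))) init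

def nRev (w x : Nat) : Nat :=
  (List.range w).foldl (fun acc i => acc ||| (((x >>> i) &&& 1) <<< (w - 1 - i))) 0

def nBfly (w r init : Nat) : Nat :=
  (List.range (w / 2)).foldl
    (fun acc i =>
      (acc ||| (((r >>> (2 * i)) &&& 1) <<< i)) |||
        (((r >>> (2 * i + 1)) &&& 1) <<< (w / 2 + i))) init

def nScatB (w y : Nat) : Nat :=
  (List.range w).foldl (fun acc i => acc ||| (((y >>> i) &&& 1) <<< bflyIdx w (w - 1 - i))) 0

def nRoundA (w k x : Nat) : Nat :=
  nBfly w (nRev w (nSbox w (x ^^^ k) ((x ^^^ k) &&& maskAbove w (4 * (w / 4)))))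
    ((nRev w (nSbox w (x ^^^ k) ((x ^^^ k) &&& maskAbove w (4 * (w / 4))))) &&& maskAbove w (2 * (w / 2)))

def nRoundB (w k x : Nat) : Nat :=
  nScatB w (nSbox w (x ^^^ k) (((x ^^^ k) >>> (4 * (w / 4))) <<< (4 * (w / 4))))

-- ---- generic bit lemmas ----

lemma testBit_one' (m : Nat) : Nat.testBit 1 m = decide (m = 0) := by
  have h : (2 ^ 0 : Nat).testBit m = decide ((0 : Nat) = m) := Nat.testBit_two_pow
  simpa [eq_comm] using h

lemma testBit_bit_shift (x i k j : Nat) :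
    (((x >>> i) &&& 1) <<< k).testBit j = (decide (j = k) && x.testBit i) := by
  rw [Nat.testBit_shiftLeft, Nat.testBit_and, Nat.testBit_shiftRight, testBit_one']
  by_cases hjk : j = k
  · subst hjk; simp
  · rcases Nat.lt_or_ge j k with h | h
    · simp [Nat.not_le.mpr h, hjk]
    · have : ¬ (j - k = 0) := by omega
      simp [this, hjk]

lemma testBit_ge_false (x n j : Nat) (h : x < 2 ^ n) (hj : n ≤ j) : x.testBit j = false :=
  Nat.testBit_lt_two_pow (lt_of_lt_of_le h (Nat.pow_le_pow_right (by norm_num) hj))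

lemma maskAbove_bit (w s : Nat) (hs : s ≤ w) (j : Nat) :
    (maskAbove w s).testBit j = (decide (s ≤ j) && decide (j < w)) := by
  unfold maskAbove
  rw [Nat.and_two_pow_sub_one_eq_mod]
  have hp : (2:Nat) ^ s * 2 ^ (w - s) = 2 ^ w := by rw [← pow_add]; congr 1; omega
  have h2 : 1 ≤ (2:Nat) ^ s := Nat.one_le_two_pow
  have h3 : 1 ≤ (2:Nat) ^ (w - s) := Nat.one_le_two_pow
  have h5 : ((2:Nat) ^ (w - s) - 1) * 2 ^ s = 2 ^ w - 2 ^ s := by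
    rw [Nat.sub_mul, one_mul, mul_comm, hp]
  have h6 : (2:Nat) ^ s ≤ 2 ^ w := Nat.pow_le_pow_right (by norm_num) hs
  have h1 : (2:Nat) ^ w - 1 = (2 ^ s - 1) + (2 ^ (w - s) - 1) * 2 ^ s := by rw [h5]; omega
  rw [h1, Nat.add_mul_mod_self_right, Nat.mod_eq_of_lt (by omega)]
  have h4 : (2 ^ s - 1) + (2 ^ (w - s) - 1) * 2 ^ s - (2 ^ s - 1) = (2 ^ (w - s) - 1) <<< s := by
    rw [Nat.shiftLeft_eq, h5]; omega
  rw [h4, Nat.testBit_shiftLeft, Nat.testBit_two_pow_sub_one]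
  by_cases h : s ≤ j
  · simp only [ge_iff_le, h, decide_true, Bool.true_and]
    exact decide_eq_decide.mpr (by omega)
  · simp [h]

lemma scatter_bit (x : Nat) (f : Nat → Nat) (n init j : Nat) :
    (((List.range n).foldl (fun acc i => acc ||| (((x >>> i) &&& 1) <<< f i)) init).testBit j = true)
      ↔ (init.testBit j = true ∨ ∃ i, i < n ∧ f i = j ∧ x.testBit i = true) := by
  induction n with
  | zero => simp
  | succ n ih =>
    rw [List.range_succ, List.foldl_append, List.foldl_cons, List.foldl_nil,
      Nat.testBit_or, testBit_bit_shift]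
    rw [Bool.or_eq_true, ih]
    constructor
    · rintro ((h | ⟨i, hi, hfi, hx⟩) | h)
      · exact Or.inl h
      · exact Or.inr ⟨i, by omega, hfi, hx⟩
      · simp only [Bool.and_eq_true, decide_eq_true_eq] at h
        exact Or.inr ⟨n, by omega, h.1.symm, h.2⟩
    · rintro (h | ⟨i, hi, hfi, hx⟩)
      · exact Or.inl (Or.inl h)
      · by_cases hin : i = n
        · subst hin
          exact Or.inr (by simp [hfi.symm, hx])
        · exact Or.inl (Or.inr ⟨i, by omega, hfi, hx⟩)

lemma bflyfold_bit (r h n init j : Nat) :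
    (((List.range n).foldl
        (fun acc i =>
          (acc ||| (((r >>> (2 * i)) &&& 1) <<< i)) ||| (((r >>> (2 * i + 1)) &&& 1) <<< (h + i)))
        init).testBit j = true)
      ↔ (init.testBit j = true ∨
          ∃ i, i < n ∧ ((j = i ∧ r.testBit (2 * i) = true) ∨ (j = h + i ∧ r.testBit (2 * i + 1) = true))) := by
  induction n with
  | zero => simp
  | succ n ih =>
    rw [List.range_succ, List.foldl_append, List.foldl_cons, List.foldl_nil,
      Nat.testBit_or, Nat.testBit_or, testBit_bit_shift, testBit_bit_shift]
    rw [Bool.or_eq_true, Bool.or_eq_true, ih]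
    constructor
    · rintro (((h1 | ⟨i, hi, hcase⟩) | h1) | h1)
      · exact Or.inl h1
      · exact Or.inr ⟨i, by omega, hcase⟩
      all_goals {
        simp only [Bool.and_eq_true, decide_eq_true_eq] at h1
        first
        | exact Or.inr ⟨n, by omega, Or.inl ⟨h1.1, h1.2⟩⟩
        | exact Or.inr ⟨n, by omega, Or.inr ⟨h1.1, h1.2⟩⟩ }
    · rintro (h1 | ⟨i, hi, hcase⟩)
      · exact Or.inl (Or.inl (Or.inl h1))
      · by_cases hin : i = n
        · subst hin
          rcases hcase with ⟨hj, hb⟩ | ⟨hj, hb⟩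
          · exact Or.inl (Or.inr (by simp [hj, hb]))
          · exact Or.inr (by simp [hj, hb])
        · exact Or.inl (Or.inl (Or.inr ⟨i, by omega, hcase⟩))

lemma nRev_bit (w x j : Nat) :
    ((nRev w x).testBit j = true) ↔ (j < w ∧ x.testBit (w - 1 - j) = true) := by
  unfold nRev
  rw [scatter_bit x (fun i => w - 1 - i) w 0 j]
  simp only [Nat.zero_testBit, Bool.false_eq_true, false_or]
  constructor
  · rintro ⟨i, hi, hfi, hx⟩
    have h1 : j < w := by omega
    have h2 : w - 1 - j = i := by omega
    exact ⟨h1, by rw [h2]; exact hx⟩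
  · rintro ⟨hj, hx⟩
    exact ⟨w - 1 - j, by omega, by omega, hx⟩

lemma sbox_init_eq (w x : Nat) (hx : x < 2 ^ w) :
    x &&& maskAbove w (4 * (w / 4)) = (x >>> (4 * (w / 4))) <<< (4 * (w / 4)) := by
  have hs : 4 * (w / 4) ≤ w := by omega
  apply Nat.eq_of_testBit_eq; intro j
  rw [Nat.testBit_and, maskAbove_bit w _ hs, Nat.testBit_shiftLeft, Nat.testBit_shiftRight]
  by_cases h1 : 4 * (w / 4) ≤ j
  · have h2 : 4 * (w / 4) + (j - 4 * (w / 4)) = j := by omega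
    rw [h2]
    by_cases h3 : j < w
    · simp [h1, h3]
    · simp [h1, h3, testBit_ge_false x w j hx (by omega)]
  · simp [h1]

lemma bflyIdx_lt (w t : Nat) (h : t < w) : bflyIdx w t < w := by
  unfold bflyIdx; split_ifs <;> omega

lemma revbfly_eq (w y : Nat) :
    nBfly w (nRev w y) ((nRev w y) &&& maskAbove w (2 * (w / 2))) = nScatB w y := by
  apply Nat.eq_of_testBit_eq; intro j
  rw [Bool.eq_iff_iff]
  unfold nBfly nScatB
  rw [bflyfold_bit, scatter_bit]
  simp only [Nat.testBit_and, Bool.and_eq_true, maskAbove_bit w (2 * (w / 2)) (by omega),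
    nRev_bit, decide_eq_true_eq, Nat.zero_testBit, Bool.false_eq_true, false_or]
  constructor
  · rintro (⟨⟨hjw, hy⟩, hkj, _⟩ | ⟨i, hi, ⟨hj, h2, hy⟩ | ⟨hj, h2, hy⟩⟩)
    · refine ⟨w - 1 - j, by omega, ?_, hy⟩
      have harg : w - 1 - (w - 1 - j) = j := by omega
      rw [harg]; unfold bflyIdx; rw [if_neg (by omega)]
    · subst hj
      refine ⟨w - 1 - 2 * j, by omega, ?_, hy⟩
      have harg : w - 1 - (w - 1 - 2 * j) = 2 * j := by omega
      rw [harg]; unfold bflyIdx; rw [if_pos (by omega), if_pos (by omega)]; omega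
    · subst hj
      refine ⟨w - 1 - (2 * i + 1), by omega, ?_, hy⟩
      have harg : w - 1 - (w - 1 - (2 * i + 1)) = 2 * i + 1 := by omega
      rw [harg]; unfold bflyIdx; rw [if_pos (by omega), if_neg (by omega)]; omega
  · rintro ⟨i, hi, hb, hy⟩
    unfold bflyIdx at hb
    by_cases h1 : w - 1 - i < 2 * (w / 2)
    · rw [if_pos h1] at hb
      by_cases h2 : (w - 1 - i) % 2 = 0
      · rw [if_pos h2] at hb
        right
        refine ⟨(w - 1 - i) / 2, by omega, Or.inl ⟨by omega, by omega, ?_⟩⟩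
        have harg : w - 1 - 2 * ((w - 1 - i) / 2) = i := by omega
        rw [harg]; exact hy
      · rw [if_neg h2] at hb
        right
        refine ⟨(w - 1 - i) / 2, by omega, Or.inr ⟨by omega, by omega, ?_⟩⟩
        have harg : w - 1 - (2 * ((w - 1 - i) / 2) + 1) = i := by omega
        rw [harg]; exact hy
    · rw [if_neg h1] at hb
      left
      refine ⟨⟨by omega, ?_⟩, by omega, by omega⟩
      have harg : w - 1 - j = i := by omega
      rw [harg]; exact hy

lemma nScatB_lt (w y : Nat) : nScatB w y < 2 ^ w := by
  apply Nat.lt_pow_two_of_testBit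
  intro j hj
  by_contra hc
  have ht : (nScatB w y).testBit j = true := by
    revert hc; cases (nScatB w y).testBit j <;> simp
  unfold nScatB at ht
  rw [scatter_bit] at ht
  rcases ht with ht | ⟨i, hi, hf, _⟩
  · simp at ht
  · have := bflyIdx_lt w (w - 1 - i) (by omega)
    omega

lemma nRound_eq (w k x : Nat) (hk : k < 2 ^ w) (hx : x < 2 ^ w) :
    nRoundA w k x = nRoundB w k x := by
  unfold nRoundA nRoundB
  rw [sbox_init_eq w (x ^^^ k) (Nat.xor_lt_two_pow hx hk), revbfly_eq]

-- ---- cast bridging ----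

lemma shl_one_cast (w : Nat) : ((1 <<< w : Nat) : Int) - 1 = ((2 ^ w - 1 : Nat) : Int) := by
  rw [Nat.one_shiftLeft, Nat.cast_sub Nat.one_le_two_pow, Nat.cast_one]

lemma band_not_cast (a n : Nat) : PySem.Int.band ↑a (Int.not ↑n) = ↑(a - (a &&& n)) := by
  have h1 : Int.not (↑n : Int) = Int.negSucc n := rfl
  rw [h1]; simp [PySem.Int.band]

lemma bandmask_cast (a w s : Nat) :
    PySem.Int.band ↑a (PySem.Int.band (((1 <<< w : Nat) : Int) - 1) (Int.not (((1 <<< s : Nat) : Int) - 1)))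
      = ↑(a &&& maskAbove w s) := by
  rw [shl_one_cast w, shl_one_cast s, band_not_cast, ← PySem.Int.band_natCast]; rfl

lemma foldl_cast {F : Int → Nat → Int} {g : Nat → Nat → Nat} (l : List Nat)
    (h : ∀ a : Nat, ∀ i ∈ l, F (↑a) i = ↑(g a i)) (a : Nat) :
    l.foldl F ↑a = ↑(l.foldl g a) := by
  induction l generalizing a with
  | nil => rfl
  | cons x xs ih =>
    rw [List.foldl_cons, List.foldl_cons, h a x List.mem_cons_self]
    exact ih (fun a i hi => h a i (List.mem_cons_of_mem _ hi)) _

lemma table_cast (n : Nat) (h : n < 16) :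
    PySem.List.pyGetD PRESENT_SBOX4 (↑n) 0 = ↑(natTable.getD n 0) := by
  interval_cases n <;> rfl

lemma shr_cast (x : Nat) (k : Nat) : ((↑x : Int) >>> k) = ((x >>> k : Nat) : Int) :=
  (Int.natCast_shiftRight _ _).symm

lemma shl_cast (x : Nat) (k : Nat) : ((↑x : Int) <<< k) = ((x <<< k : Nat) : Int) :=
  (Int.natCast_shiftLeft _ _).symm

lemma band_one_cast (m : Nat) : PySem.Int.band (↑m) (1 : Int) = ↑(m &&& 1) := by
  exact_mod_cast PySem.Int.band_natCast m 1

lemma band_nib_cast (m : Nat) : PySem.Int.band (↑m) (0xf : Int) = ↑(m &&& 15) := by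
  exact_mod_cast PySem.Int.band_natCast m 15

lemma sbox_cast (width : Int) (x : Nat) :
    sbox (↑x) width PRESENT_SBOX4
      = ↑(nSbox width.toNat x (x &&& maskAbove width.toNat (4 * (width.toNat / 4)))) := by
  unfold sbox nSbox
  dsimp only
  rw [bandmask_cast]
  apply foldl_cast
  intro a i _
  rw [shr_cast x (4 * i), band_nib_cast]
  rw [table_cast _ (by have := Nat.and_le_right (n := x >>> (4 * i)) (m := 15); omega)]
  rw [shl_cast, PySem.Int.bor_natCast]

lemma rev_cast (w : Nat) (s : Nat) :
    (List.range w).foldl (fun acc (i : Nat) =>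
        PySem.Int.bor acc ((PySem.Int.band ((↑s : Int) >>> i) 1) <<< (w - 1 - i))) 0
      = ↑(nRev w s) := by
  unfold nRev
  rw [show (0 : Int) = ((0 : Nat) : Int) from rfl]
  apply foldl_cast
  intro a i _
  rw [shr_cast, band_one_cast, shl_cast, PySem.Int.bor_natCast]

lemma bfly_cast (w : Nat) (r : Nat) :
    (List.range (w / 2)).foldl (fun acc (i : Nat) =>
        let acc := PySem.Int.bor acc ((PySem.Int.band ((↑r : Int) >>> (2 * i)) 1) <<< i)
        PySem.Int.bor acc ((PySem.Int.band ((↑r : Int) >>> (2 * i + 1)) 1) <<< (w / 2 + i)))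
      (PySem.Int.band ↑r (PySem.Int.band (((1 <<< w : Nat) : Int) - 1)
        (Int.not (((1 <<< (2 * (w / 2)) : Nat) : Int) - 1))))
      = ↑(nBfly w r (r &&& maskAbove w (2 * (w / 2)))) := by
  unfold nBfly
  rw [bandmask_cast]
  apply foldl_cast
  intro a i _
  dsimp only
  rw [shr_cast, band_one_cast, shl_cast, PySem.Int.bor_natCast,
    shr_cast, band_one_cast, shl_cast, PySem.Int.bor_natCast]

lemma portA_eval (dn kn : Nat) (width num_rounds : Int) :
    subst_perm_enc ↑dn ↑kn width num_rounds
      = PySem.Int.bxor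
          ↑((List.range num_rounds.toNat).foldl (fun a _ => nRoundA width.toNat kn a) dn) ↑kn := by
  unfold subst_perm_enc
  dsimp only
  congr 1
  apply foldl_cast
  intro a i _
  rw [PySem.Int.bxor_natCast, sbox_cast, rev_cast, bfly_cast]
  rfl

lemma getD_map_range (w : Nat) (f : Nat → Nat) (i : Nat) (h : i < w) :
    (((List.range w).map f).getD i 0) = f i := by
  rw [List.getD_eq_getElem?_getD, List.getElem?_map, List.getElem?_range h]; rfl

lemma scatB_cast (w : Nat) (y : Nat) :
    (List.range w).foldl (fun acc (i : Nat) =>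
        PySem.Int.bor acc ((PySem.Int.band ((↑y : Int) >>> i) 1)
          <<< (((List.range w).map (fun i =>
            let j := w - 1 - i
            if j < 2 * (w / 2) then (if j % 2 = 0 then j / 2 else w / 2 + j / 2) else j)).getD i 0))) 0
      = ↑(nScatB w y) := by
  unfold nScatB
  rw [show (0 : Int) = ((0 : Nat) : Int) from rfl]
  apply foldl_cast
  intro a i hi
  rw [getD_map_range w _ i (List.mem_range.mp hi)]
  rw [shr_cast, band_one_cast, shl_cast, PySem.Int.bor_natCast]
  rfl

lemma portB_eval (dn kn : Nat) (width num_rounds : Int) :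
    subst_perm_enc_alt ↑dn ↑kn width num_rounds
      = PySem.Int.bxor
          ↑((List.range num_rounds.toNat).foldl (fun a _ => nRoundB width.toNat kn a) dn) ↑kn := by
  unfold subst_perm_enc_alt
  dsimp only
  congr 1
  apply foldl_cast
  intro a i _
  rw [PySem.Int.bxor_natCast]
  rw [shr_cast (a ^^^ kn), shl_cast]
  -- sbox fold: bridge to nSbox
  have hfold :
      (List.range (width.toNat / 4)).foldl (fun y (i : Nat) =>
          PySem.Int.bor y ((PySem.List.pyGetD PRESENT_SBOX4
            (PySem.Int.band (((a ^^^ kn : Nat) : Int) >>> (4 * i)) 0xf) 0) <<< (4 * i)))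
        ↑((a ^^^ kn) >>> (4 * (width.toNat / 4)) <<< (4 * (width.toNat / 4)))
      = ↑(nSbox width.toNat (a ^^^ kn)
          (((a ^^^ kn) >>> (4 * (width.toNat / 4))) <<< (4 * (width.toNat / 4)))) := by
    unfold nSbox
    apply foldl_cast
    intro b i _
    rw [shr_cast (a ^^^ kn) (4 * i), band_nib_cast]
    rw [table_cast _ (by have := Nat.and_le_right (n := (a ^^^ kn) >>> (4 * i)) (m := 15); omega)]
    rw [shl_cast, PySem.Int.bor_natCast]
  rw [hfold, scatB_cast]
  rfl

lemma iter_eq (w kn : Nat) (hk : kn < 2 ^ w) (d : Nat) (hd : d < 2 ^ w) (n : Nat) :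
    (List.range n).foldl (fun a _ => nRoundA w kn a) d
      = (List.range n).foldl (fun a _ => nRoundB w kn a) d := by
  have hlt : ∀ m, (List.range m).foldl (fun a _ => nRoundB w kn a) d < 2 ^ w := by
    intro m
    cases m with
    | zero => simpa using hd
    | succ m' =>
      rw [List.range_succ, List.foldl_append, List.foldl_cons, List.foldl_nil]
      exact nScatB_lt _ _
  induction n with
  | zero => rfl
  | succ m ih =>
    rw [List.range_succ, List.foldl_append, List.foldl_append, List.foldl_cons,
      List.foldl_cons, List.foldl_nil, List.foldl_nil, ih]
    exact nRound_eq w kn _ hk (hlt m)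

-- ===== VERDICT (by name: the statement is the Claim_ definition above) =====
theorem subst_perm_enc_spec : Claim_equal_subst_perm_enc := by
  intro data key width num_rounds _ hPre
  obtain ⟨hw, hd0, hdlt, hk0, hklt⟩ := hPre
  unfold Spec_subst_perm_enc
  have hdata : data = ↑data.toNat := (Int.toNat_of_nonneg hd0).symm
  have hkey : key = ↑key.toNat := (Int.toNat_of_nonneg hk0).symm
  have hdn : data.toNat < 2 ^ width.toNat := by
    have : (↑data.toNat : Int) < ((2 ^ width.toNat : Nat) : Int) := by
      rw [← hdata]; push_cast; exact hdlt
    exact_mod_cast this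
  have hkn : key.toNat < 2 ^ width.toNat := by
    have : (↑key.toNat : Int) < ((2 ^ width.toNat : Nat) : Int) := by
      rw [← hkey]; push_cast; exact hklt
    exact_mod_cast this
  rw [hdata, hkey, portA_eval, portB_eval, iter_eq width.toNat key.toNat hkn data.toNat hdn]
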